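-- pv_equiv track=rewrite | github.com/emiriko/IR | TP2/TP2_2106752180/exp_hyperparameter.py | get_matching_docs
-- ===== SOURCE A (Python) =====
-- def get_matching_docs(tf_idf, bm25):
--     """
--         Computes the number of exact matches and loose matches between two lists of documents.
--
--         Parameters:
--         - tf_idf_docs: List of documents from TF-IDF ranked results
--         - bm25_docs: List of documents from BM25 ranked results
--
--         Returns:
--         - exact_matches: Number of documents that match in the same position
--         - loose_matches: Number of documents that match but in different positions
--     """
--
--     exact_matches = 0
--     loose_matches = 0
--
--     for i, doc in enumerate(bm25):
--         if i < len(tf_idf) and tf_idf[i] == doc: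
--             exact_matches += 1
--         elif doc in tf_idf:
--             loose_matches += 1
--
--     return exact_matches, loose_matches
-- ===== SOURCE B (Python) =====
-- def get_matching_docs(tf_idf, bm25):
--     tf_set = set(tf_idf)
--     exact_matches = sum(1 for a, b in zip(tf_idf, bm25) if a == b)
--     present = sum(1 for doc in bm25 if doc in tf_set)
--     return exact_matches, present - exact_matches
-- ===== Notes on version B (the rewrite author's own statement) =====
-- stated objective: faster
-- what changed: Replaces the single indexed loop with if/elif branching by two independent aggregate passes (positional zip count of exact matches and a set-membership count of all present bm25 docs) combined by the arithmetic identity loose = present - exact, removing the O(n) 'doc in tf_idf' list scan per element.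
import Mathlib
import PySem

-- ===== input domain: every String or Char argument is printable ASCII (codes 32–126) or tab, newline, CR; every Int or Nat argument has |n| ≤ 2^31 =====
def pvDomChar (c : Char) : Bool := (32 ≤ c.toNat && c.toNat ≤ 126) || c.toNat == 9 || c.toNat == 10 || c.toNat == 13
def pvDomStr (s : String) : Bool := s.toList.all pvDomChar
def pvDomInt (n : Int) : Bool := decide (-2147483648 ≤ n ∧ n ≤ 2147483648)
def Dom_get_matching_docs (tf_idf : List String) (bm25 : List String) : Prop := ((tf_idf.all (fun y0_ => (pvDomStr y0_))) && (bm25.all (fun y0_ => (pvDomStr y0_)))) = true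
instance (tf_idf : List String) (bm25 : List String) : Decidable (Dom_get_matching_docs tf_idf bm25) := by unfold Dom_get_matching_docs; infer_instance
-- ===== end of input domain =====

-- B replaces A's single indexed loop with if/elif by two independent aggregate passes
-- (positional exact count and set-membership present count) combined as loose = present - exact,
-- removing the per-element list scan 'doc in tf_idf' (objective: faster).

-- ===== PORT A =====
-- the 'for i, doc in enumerate(bm25)' loop, carrying (exact_matches, loose_matches)
def pvGoA (tf_idf : List String) : Nat → List String → Int × Int → Int × Int
  | _, [], st => st
  | i, doc :: rest, (e, l) =>
    if i < tf_idf.length ∧ tf_idf[i]? = some doc then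
      pvGoA tf_idf (i + 1) rest (e + 1, l)
    else if doc ∈ tf_idf then
      pvGoA tf_idf (i + 1) rest (e, l + 1)
    else
      pvGoA tf_idf (i + 1) rest (e, l)

def get_matching_docs (tf_idf : List String) (bm25 : List String) : Int × Int :=
  pvGoA tf_idf 0 bm25 (0, 0)

-- ===== PORT B =====
def get_matching_docs_alt (tf_idf : List String) (bm25 : List String) : Int × Int :=
  let tf_set : PySem.Set String := PySem.Set.ofList tf_idf
  let exact_matches : Int :=
    (tf_idf.zip bm25).foldl (fun acc p => if p.1 = p.2 then acc + 1 else acc) 0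
  let present : Int :=
    bm25.foldl (fun acc doc => if PySem.Set.contains tf_set doc then acc + 1 else acc) 0
  (exact_matches, present - exact_matches)

-- ===== PRECONDITION & SPEC =====
def Spec_get_matching_docs (tf_idf : List String) (bm25 : List String) (out : Int × Int) : Prop := out = get_matching_docs_alt tf_idf bm25
instance (tf_idf : List String) (bm25 : List String) (out : Int × Int) : Decidable (Spec_get_matching_docs tf_idf bm25 out) := by unfold Spec_get_matching_docs; infer_instance

-- ===== CLAIM (what is proved, stated in full; the proofs are below) =====
def Claim_equal_get_matching_docs : Prop := ∀ (tf_idf : List String) (bm25 : List String), Dom_get_matching_docs tf_idf bm25 → Spec_get_matching_docs tf_idf bm25 (get_matching_docs tf_idf bm25)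

-- ===== LEMMAS AND PROOFS =====

-- recursive counters used only by the proof
def pvZex : List String → List String → Int
  | _, [] => 0
  | [], _ :: _ => 0
  | a :: tfr, b :: bmr => (if a = b then 1 else 0) + pvZex tfr bmr

def pvPrs (tf_idf : List String) : List String → Int
  | [] => 0
  | d :: rest => (if d ∈ tf_idf then 1 else 0) + pvPrs tf_idf rest

theorem pvZex_nonneg : ∀ (xs ys : List String), 0 ≤ pvZex xs ys
  | _, [] => by simp [pvZex]
  | [], _ :: _ => by simp [pvZex]
  | a :: tfr, b :: bmr => by
    have := pvZex_nonneg tfr bmr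
    simp only [pvZex]; split <;> omega

theorem pvZex_drop_cons (tf_idf : List String) (i : Nat) (d : String) (rest : List String) :
    pvZex (tf_idf.drop i) (d :: rest) =
      (if tf_idf[i]? = some d then 1 else 0) + pvZex (tf_idf.drop (i + 1)) rest := by
  rcases h : tf_idf.drop i with _ | ⟨a, tl⟩
  · have hi : tf_idf.length ≤ i := by
      have := List.drop_eq_nil_iff.mp h; omega
    have h2 : tf_idf.drop (i + 1) = [] := List.drop_eq_nil_iff.mpr (by omega)
    have h3 : tf_idf[i]? = none := by
      simp; omega
    cases rest <;> simp [pvZex, h2, h3]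
  · have hget : tf_idf[i]? = some a := by
      have h0 : (List.drop i tf_idf)[0]? = some a := by simp [h]
      rw [List.getElem?_drop] at h0
      simpa using h0
    have htl : tf_idf.drop (i + 1) = tl := by
      rw [← List.tail_drop, h]; rfl
    simp only [pvZex, htl, hget]
    by_cases hd : a = d <;> simp [hd]

theorem pvGoA_eq (tf_idf : List String) : ∀ (bm : List String) (i : Nat) (e l : Int),
    pvGoA tf_idf i bm (e, l) =
      (e + pvZex (tf_idf.drop i) bm, l + pvPrs tf_idf bm - pvZex (tf_idf.drop i) bm)
  | [], i, e, l => by cases h : tf_idf.drop i <;> simp [pvGoA, pvZex, pvPrs]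
  | d :: rest, i, e, l => by
    have ih := pvGoA_eq tf_idf rest (i + 1)
    have hz := pvZex_drop_cons tf_idf i d rest
    simp only [pvGoA]
    split
    · next hcond =>
      have hmem : d ∈ tf_idf := by
        rcases hcond with ⟨_, hg⟩
        exact List.mem_of_getElem? hg
      rw [ih]
      simp only [pvPrs, hz, hcond.2, if_pos hmem]
      rw [Prod.ext_iff]; exact ⟨by simp; try ring, by simp; try ring⟩
    · next hcond =>
      have hget : ¬ tf_idf[i]? = some d := fun hg => by
        have : i < tf_idf.length := by
          by_contra hh
          rw [List.getElem?_eq_none_iff.mpr (by omega)] at hg; simp at hg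
        exact hcond ⟨this, hg⟩
      split
      · next hmem =>
        rw [ih]
        simp only [pvPrs, hz, if_neg hget, if_pos hmem]
        rw [Prod.ext_iff]; exact ⟨by simp; try ring, by simp; try ring⟩
      · next hmem =>
        rw [ih]
        simp only [pvPrs, hz, if_neg hget, if_neg hmem]
        rw [Prod.ext_iff]; exact ⟨by simp; try ring, by simp; try ring⟩

theorem pvZex_foldl (acc : Int) : ∀ (xs ys : List String),
    (xs.zip ys).foldl (fun acc p => if p.1 = p.2 then acc + 1 else acc) acc
      = acc + pvZex xs ys
  | _, [] => by simp [pvZex]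
  | [], _ :: _ => by simp [pvZex]
  | a :: tfr, b :: bmr => by
    simp only [List.zip_cons_cons, List.foldl_cons, pvZex]
    by_cases h : a = b <;> simp [h, pvZex_foldl _ tfr bmr] <;> try ring

theorem pvPrs_foldl (tf_idf : List String) (acc : Int) : ∀ (bm : List String),
    bm.foldl (fun acc doc => if PySem.Set.contains (PySem.Set.ofList tf_idf) doc then acc + 1 else acc) acc
      = acc + pvPrs tf_idf bm
  | [] => by simp [pvPrs]
  | d :: rest => by
    simp only [List.foldl_cons, pvPrs]
    by_cases h : d ∈ tf_idf
    · rw [if_pos (by simp [PySem.Set.mem_ofList, h]),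
        pvPrs_foldl tf_idf _ rest]
      simp [h]; ring
    · rw [if_neg (by simp [PySem.Set.mem_ofList, h]),
        pvPrs_foldl tf_idf _ rest]
      simp [h]

-- ===== VERDICT (by name: the statement is the Claim_ definition above) =====
theorem get_matching_docs_spec : Claim_equal_get_matching_docs := by
  intro tf_idf bm25 _
  show get_matching_docs tf_idf bm25 = get_matching_docs_alt tf_idf bm25
  unfold get_matching_docs get_matching_docs_alt
  simp only [pvGoA_eq, pvZex_foldl, pvPrs_foldl, List.drop_zero, zero_add]
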